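-- pv_equiv track=rewrite | github.com/andrewprogers/crossword-rebuild | api/database/scratch.py | grid_from_iterable
-- ===== SOURCE A (Python) =====
-- from typing import List, Iterable
--
-- def grid_from_iterable(iterable: Iterable[str], rows:int, cols:int) -> List[List[str]]:
--     it = iter(iterable)
--     try:
--         grid = [[next(it) for _ in range (cols)] for _ in range(rows)]
--         if next(it, None) is None:
--             return grid
--         raise ValueError("Iterable length greater than rows*cols")
--     except StopIteration:
--         raise ValueError("Iterable length less than rows*cols")
-- ===== SOURCE B (Python) =====
-- from typing import List, Iterable
--
-- def grid_from_iterable(iterable: Iterable[str], rows: int, cols: int) -> List[List[str]]: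
--     items = list(iterable)
--     grid = [items[i * cols:(i + 1) * cols] for i in range(rows)]
--     if any(len(row) < cols for row in grid):
--         raise ValueError("Iterable length less than rows*cols")
--     if sum(len(row) for row in grid) < len(items):
--         raise ValueError("Iterable length greater than rows*cols")
--     return grid
-- ===== Notes on version B (the rewrite author's own statement) =====
-- stated objective: alternative
-- what changed: B materializes the iterable once and slices the flat list into rows, then validates from the grid itself (a short row means too few items, leftover items mean too many), instead of A's streaming next()/StopIteration protocol inside a nested comprehension with a sentinel next() probe.
import Mathlib
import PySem

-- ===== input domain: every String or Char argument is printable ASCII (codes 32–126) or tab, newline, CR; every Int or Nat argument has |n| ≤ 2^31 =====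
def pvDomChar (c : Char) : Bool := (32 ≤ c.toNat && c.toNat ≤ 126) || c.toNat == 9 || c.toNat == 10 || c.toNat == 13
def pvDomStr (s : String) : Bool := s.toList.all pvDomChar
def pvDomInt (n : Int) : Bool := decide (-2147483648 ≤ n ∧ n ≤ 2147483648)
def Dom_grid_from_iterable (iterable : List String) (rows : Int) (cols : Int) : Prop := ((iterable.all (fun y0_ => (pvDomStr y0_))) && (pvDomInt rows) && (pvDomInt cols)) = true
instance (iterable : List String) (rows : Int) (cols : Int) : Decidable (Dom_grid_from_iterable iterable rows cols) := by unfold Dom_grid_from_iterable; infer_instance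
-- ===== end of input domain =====

-- B slices a buffered list into rows and validates from the grid itself, replacing A's streaming
-- next()/StopIteration protocol; equivalence is about the RETURN value on Pre_ (where A returns).

-- ===== PORT A =====
-- [next(it) for _ in range(cols)]: consume cols elements; none = StopIteration
def pvTakeRow : List String → Nat → Option (List String × List String)
  | xs, 0 => some ([], xs)
  | [], _ + 1 => none
  | x :: xs, n + 1 => (pvTakeRow xs n).map (fun p => (x :: p.1, p.2))

-- the outer comprehension over range(rows)
def pvTakeGrid : List String → Nat → Nat → Option (List (List String) × List String)
  | xs, 0, _ => some ([], xs)
  | xs, r + 1, c =>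
    (pvTakeRow xs c).bind fun p =>
      (pvTakeGrid p.2 r c).map fun q => (p.1 :: q.1, q.2)

def grid_from_iterable (iterable : List String) (rows : Int) (cols : Int) : List (List String) :=
  match pvTakeGrid iterable rows.toNat cols.toNat with
  | none => []            -- StopIteration → ValueError "Iterable length less than rows*cols"
  | some (grid, rest) =>
    if rest = [] then grid -- next(it, None) is None
    else []                -- ValueError "Iterable length greater than rows*cols"

-- ===== PORT B =====
def grid_from_iterable_alt (iterable : List String) (rows : Int) (cols : Int) : List (List String) :=
  let grid := (PySem.List.pyRange 0 rows 1).map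
    (fun i => PySem.List.slice iterable (some (i * cols)) (some ((i + 1) * cols)))
  if grid.any (fun row => decide ((row.length : Int) < cols)) then []   -- ValueError "… less than rows*cols"
  else if (grid.map List.length).sum < iterable.length then []          -- ValueError "… greater than rows*cols"
  else grid

-- ===== PRECONDITION & SPEC =====
-- A returns normally exactly when the iterable has exactly max(rows,0)*max(cols,0) elements
-- (range() over a negative count yields nothing); elsewhere both programs raise ValueError.
def Pre_grid_from_iterable (iterable : List String) (rows : Int) (cols : Int) : Prop :=
  (iterable.length : Int) = max rows 0 * max cols 0
instance (iterable : List String) (rows : Int) (cols : Int) : Decidable (Pre_grid_from_iterable iterable rows cols) := by unfold Pre_grid_from_iterable; infer_instance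

def pvWitness_grid_from_iterable : List String × Int × Int := (["a", "b", "c", "d", "e", "f"], 2, 3)

def Spec_grid_from_iterable (iterable : List String) (rows : Int) (cols : Int) (out : List (List String)) : Prop := out = grid_from_iterable_alt iterable rows cols
instance (iterable : List String) (rows : Int) (cols : Int) (out : List (List String)) : Decidable (Spec_grid_from_iterable iterable rows cols out) := by unfold Spec_grid_from_iterable; infer_instance

-- ===== CLAIM (what is proved, stated in full; the proofs are below) =====
def Claim_equal_grid_from_iterable : Prop := ∀ (iterable : List String) (rows : Int) (cols : Int), Dom_grid_from_iterable iterable rows cols → Pre_grid_from_iterable iterable rows cols → Spec_grid_from_iterable iterable rows cols (grid_from_iterable iterable rows cols)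

-- ===== LEMMAS AND PROOFS =====
theorem pvTakeRow_of_le (xs : List String) (c : Nat) (h : c ≤ xs.length) :
    pvTakeRow xs c = some (xs.take c, xs.drop c) := by
  induction xs generalizing c with
  | nil =>
    have : c = 0 := by simpa using h
    subst this; simp [pvTakeRow]
  | cons x xs ih =>
    cases c with
    | zero => simp [pvTakeRow]
    | succ n =>
      simp only [List.length_cons, Nat.succ_le_succ_iff] at h
      simp [pvTakeRow, ih n h]

theorem pvTakeGrid_exact (r c : Nat) (xs : List String) (h : xs.length = r * c) :
    pvTakeGrid xs r c =
      some (((List.range r).map (fun i => (xs.drop (i * c)).take c)), []) := by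
  induction r generalizing xs with
  | zero => simpa [pvTakeGrid] using List.eq_nil_of_length_eq_zero (by simpa using h)
  | succ n ih =>
    have hc : c ≤ xs.length := by rw [h, Nat.succ_mul]; omega
    have hd : (xs.drop c).length = n * c := by
      rw [List.length_drop, h, Nat.succ_mul]; omega
    rw [pvTakeGrid, pvTakeRow_of_le xs c hc]
    simp only [Option.bind_some, ih (xs.drop c) hd, Option.map_some]
    rw [List.range_succ_eq_map]
    simp [List.map_map, Function.comp_def, Nat.add_mul, List.drop_drop, Nat.add_comm]

theorem pvRowLen (xs : List String) (rn cn i : Nat) (h : xs.length = rn * cn) (hi : i < rn) :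
    ((xs.drop (i * cn)).take cn).length = cn := by
  rw [List.length_take, List.length_drop, h]
  have h1 : cn ≤ rn * cn - i * cn := by
    rw [← Nat.sub_mul]
    exact Nat.le_mul_of_pos_left cn (by omega)
  omega

-- ===== VERDICT (by name: the statement is the Claim_ definition above) =====
theorem grid_from_iterable_spec : Claim_equal_grid_from_iterable := by
  intro xs rows cols _ hpre
  unfold Pre_grid_from_iterable at hpre
  unfold Spec_grid_from_iterable grid_from_iterable grid_from_iterable_alt
  by_cases hc : 0 ≤ cols
  case neg =>
    -- cols < 0: the iterable is empty; both produce rows.toNat empty rows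
    have hc0 : cols.toNat = 0 := by omega
    have hm : max cols 0 = 0 := by omega
    have hx : xs = [] := by
      have : xs.length = 0 := by
        have := hpre; rw [hm, mul_zero] at this; exact_mod_cast this
      simpa using this
    subst hx
    have hlen : ([] : List String).length = rows.toNat * cols.toNat := by simp [hc0]
    have hs : ∀ a b : Option Int, PySem.List.slice ([] : List String) a b = [] := by
      intro a b; cases a <;> cases b <;> simp [PySem.List.slice]
    have hlt : ¬ ((0 : Int) < cols) := by omega
    rw [pvTakeGrid_exact _ _ _ hlen]
    simp only [hs, List.drop_nil, List.take_nil, List.length_nil]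
    simp [PySem.List.pyRange_one, Function.comp_def, decide_eq_false hlt,
      List.map_const', List.eq_replicate_iff]
  -- main case: 0 ≤ cols
  have hcn : ((cols.toNat : Nat) : Int) = cols := Int.toNat_of_nonneg hc
  have hlen : xs.length = rows.toNat * cols.toNat := by
    have h2 : (xs.length : Int) = ((rows.toNat : Nat) : Int) * ((cols.toNat : Nat) : Int) := by
      rw [Int.ofNat_toNat, Int.ofNat_toNat]; exact hpre
    exact_mod_cast h2
  have hgrid : (PySem.List.pyRange 0 rows 1).map
      (fun i => PySem.List.slice xs (some (i * cols)) (some ((i + 1) * cols)))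
      = (List.range rows.toNat).map (fun i => (xs.drop (i * cols.toNat)).take cols.toNat) := by
    rw [PySem.List.pyRange_one]
    simp only [sub_zero, zero_add, List.map_map, Function.comp_def]
    apply List.map_congr_left
    intro i _
    have hsplit : ((i : Int) + 1) * cols = ((i : Int)) * cols + cols := by ring
    rw [hsplit]
    have hic : (i : Int) * cols = ((i * cols.toNat : Nat) : Int) := by
      push_cast [Int.toNat_of_nonneg hc]; ring
    rw [hic]
    have := PySem.List.slice_natCast_add xs (i * cols.toNat) cols.toNat
    rw [show ((i * cols.toNat : Nat) : Int) + ((cols.toNat : Nat) : Int)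
        = ((i * cols.toNat : Nat) : Int) + cols by rw [hcn]] at this
    exact this
  have h1 : ((List.range rows.toNat).map
      (fun i => (xs.drop (i * cols.toNat)).take cols.toNat)).any
      (fun row => decide ((row.length : Int) < cols)) = false := by
    rw [List.any_eq_false]
    intro r hr
    rw [List.mem_map] at hr
    obtain ⟨i, hi, hri⟩ := hr
    rw [List.mem_range] at hi
    rw [← hri, pvRowLen xs rows.toNat cols.toNat i hlen hi]
    simp [hcn]
  have h2 : (((List.range rows.toNat).map
      (fun i => (xs.drop (i * cols.toNat)).take cols.toNat)).map List.length).sum = xs.length := by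
    rw [List.map_map]
    have hrep : (List.range rows.toNat).map
        (List.length ∘ fun i => (xs.drop (i * cols.toNat)).take cols.toNat)
        = List.replicate rows.toNat cols.toNat := by
      rw [List.eq_replicate_iff]
      constructor
      · simp
      · intro b hb
        rw [List.mem_map] at hb
        obtain ⟨i, hi, hbi⟩ := hb
        rw [List.mem_range] at hi
        rw [← hbi]
        exact pvRowLen xs rows.toNat cols.toNat i hlen hi
    rw [hrep, List.sum_replicate, smul_eq_mul, hlen]
  rw [pvTakeGrid_exact _ _ _ hlen]
  simp only [hgrid]
  simp only [h1]
  simp only [Bool.false_eq_true, if_false]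
  simp only [h2, lt_self_iff_false, if_false, if_true]
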